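-- pv_equiv track=rewrite | github.com/joshmessi10/PROJECT-TR1N1TY | HACKERRANK/Beautiful Paris/josh.py | beautifulPairs
-- ===== SOURCE A (Python) =====
-- from collections import Counter
--
-- def beautifulPairs(A, B):
--     counterA = dict(Counter(A))
--     counterB = dict(Counter(B))
--     matches = 0
--     for element in counterA:
--         matches += min(counterA[element], counterB.get(element, 0))
--     if matches < len(A):
--         return matches + 1
--     else:
--         return matches - 1
-- ===== SOURCE B (Python) =====
-- def beautifulPairs(A, B):
--     sa = sorted(A)
--     sb = sorted(B)
--     i = j = matches = 0
--     while i < len(sa) and j < len(sb):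
--         if sa[i] == sb[j]:
--             matches += 1
--             i += 1
--             j += 1
--         elif sa[i] < sb[j]:
--             i += 1
--         else:
--             j += 1
--     return matches + 1 if matches < len(A) else matches - 1
-- ===== Notes on version B (the rewrite author's own statement) =====
-- stated objective: alternative
-- what changed: B counts the multiset intersection by sorting both lists and walking them with two pointers (ordered merge) instead of building Counter hash maps and summing per-key minima.
import Mathlib
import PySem

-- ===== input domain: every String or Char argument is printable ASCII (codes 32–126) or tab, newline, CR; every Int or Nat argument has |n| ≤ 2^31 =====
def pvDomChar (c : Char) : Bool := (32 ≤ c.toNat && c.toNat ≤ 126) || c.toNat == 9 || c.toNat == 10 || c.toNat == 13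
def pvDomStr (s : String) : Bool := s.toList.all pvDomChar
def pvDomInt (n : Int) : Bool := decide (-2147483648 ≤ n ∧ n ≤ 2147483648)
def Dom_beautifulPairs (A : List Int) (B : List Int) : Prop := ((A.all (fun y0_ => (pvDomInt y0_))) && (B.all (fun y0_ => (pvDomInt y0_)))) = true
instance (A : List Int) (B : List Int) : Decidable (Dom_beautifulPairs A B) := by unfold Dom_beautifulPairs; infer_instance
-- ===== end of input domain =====

-- B replaces A's Counter hash maps by sorting both lists and counting the multiset
-- intersection with a two-pointer merge; alternative algorithm, same return value.

-- ===== PORT A =====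
def beautifulPairs (A : List Int) (B : List Int) : Int :=
  let counterA := PySem.Dict.counter A
  let counterB := PySem.Dict.counter B
  let m_ := counterA.keys.foldl
    (fun m element => m + min (counterA.getD element 0) (counterB.getD element 0)) 0
  if m_ < (A.length : Int) then m_ + 1 else m_ - 1

-- ===== PORT B =====
-- the two-pointer while loop of Source B as structural recursion on the two sorted lists
def bpMergeCount : List Int → List Int → Int
  | [], _ => 0
  | _ :: _, [] => 0
  | x :: xs, y :: ys =>
    if x = y then bpMergeCount xs ys + 1
    else if x < y then bpMergeCount xs (y :: ys)
    else bpMergeCount (x :: xs) ys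
termination_by l₁ l₂ => l₁.length + l₂.length

def beautifulPairs_alt (A : List Int) (B : List Int) : Int :=
  let sa := PySem.List.sorted A (fun x => x) false
  let sb := PySem.List.sorted B (fun x => x) false
  let m_ := bpMergeCount sa sb
  if m_ < (A.length : Int) then m_ + 1 else m_ - 1

-- ===== PRECONDITION & SPEC =====
def Spec_beautifulPairs (A : List Int) (B : List Int) (out : Int) : Prop := out = beautifulPairs_alt A B
instance (A : List Int) (B : List Int) (out : Int) : Decidable (Spec_beautifulPairs A B out) := by unfold Spec_beautifulPairs; infer_instance

-- ===== CLAIM (what is proved, stated in full; the proofs are below) =====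
def Claim_equal_beautifulPairs : Prop := ∀ (A : List Int) (B : List Int), Dom_beautifulPairs A B → Spec_beautifulPairs A B (beautifulPairs A B)

-- ===== LEMMAS AND PROOFS =====

-- the number both programs compute: the size of the multiset intersection
def bpInterCard (A B : List Int) : Nat := ((A : Multiset Int) ∩ (B : Multiset Int)).card

-- A's loop: sum over the counter's keys of min of the two counts
theorem bp_foldl_eq_sum (l : List Int) (f : Int → Int) (init : Int) :
    l.foldl (fun m e => m + f e) init = init + (l.map f).sum := by
  induction l generalizing init with
  | nil => simp
  | cons x xs ih => simp [List.foldl_cons, ih]; ring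

theorem bp_sum_min_eq_interCard (A B : List Int) :
    (((PySem.Set.ofList A : List Int)).map
        (fun e => min ((A.count e : Int)) ((B.count e : Int)))).sum
      = (bpInterCard A B : Int) := by
  have hnd : (PySem.Set.ofList A : List Int).Nodup := PySem.Set.nodup_ofList A
  have h1 : (((PySem.Set.ofList A : List Int)).map
        (fun e => min ((A.count e : Int)) ((B.count e : Int)))).sum
      = ∑ e ∈ (Multiset.ofList (PySem.Set.ofList A)).toFinset,
          min ((A.count e : Int)) ((B.count e : Int)) := by
    rw [Finset.sum]
    rw [Multiset.toFinset_val]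
    rw [Multiset.dedup_eq_self.mpr (by exact_mod_cast hnd)]
    simp [Multiset.map_coe]
  rw [h1]
  have hset : (Multiset.ofList (PySem.Set.ofList A)).toFinset = (A : Multiset Int).toFinset := by
    ext x
    simp [PySem.Set.mem_ofList A x]
  rw [hset]
  have hsub : ((A : Multiset Int) ∩ (B : Multiset Int)).toFinset ⊆ (A : Multiset Int).toFinset := by
    intro x hx
    simp only [Multiset.mem_toFinset] at hx ⊢
    exact Multiset.mem_of_le (Multiset.inter_le_left ..) hx
  have hz : ∀ x ∈ (A : Multiset Int).toFinset,
      x ∉ ((A : Multiset Int) ∩ (B : Multiset Int)).toFinset →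
      min ((A.count x : Int)) ((B.count x : Int)) = 0 := by
    intro x _ hx
    simp only [Multiset.mem_toFinset] at hx
    have h0 := Multiset.count_eq_zero.2 hx
    rw [Multiset.count_inter] at h0
    simp only [Multiset.coe_count] at h0
    rw [← Nat.cast_min]
    exact_mod_cast h0
  rw [← Finset.sum_subset hsub hz]
  rw [bpInterCard, ← Multiset.toFinset_sum_count_eq ((A : Multiset Int) ∩ (B : Multiset Int))]
  push_cast
  apply Finset.sum_congr rfl
  intro e _
  rw [Multiset.count_inter]
  simp [Multiset.coe_count]

theorem bp_matchesA (A B : List Int) :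
    (PySem.Dict.counter A).keys.foldl
      (fun m element => m + min ((PySem.Dict.counter A).getD element 0)
        ((PySem.Dict.counter B).getD element 0)) 0
    = (bpInterCard A B : Int) := by
  rw [bp_foldl_eq_sum]
  rw [PySem.Dict.keys_counter]
  rw [← bp_sum_min_eq_interCard A B]
  ring_nf
  congr 1
  apply List.map_congr_left
  intro e _
  rw [PySem.Dict.getD_counter, PySem.Dict.getD_counter]

-- B's merge on sorted lists also computes the intersection card
theorem bp_mergeCount_sorted (xs ys : List Int)
    (hx : xs.Pairwise (· ≤ ·)) (hy : ys.Pairwise (· ≤ ·)) :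
    bpMergeCount xs ys = (((xs : Multiset Int) ∩ (ys : Multiset Int)).card : Int) := by
  fun_induction bpMergeCount xs ys with
  | case1 ys => simp [Multiset.zero_inter]
  | case2 x xs => simp [Multiset.inter_zero]
  | case3 xs x ys ih =>
    have h1 : ((x :: xs : List Int) : Multiset Int) ∩ ((x :: ys : List Int) : Multiset Int)
        = x ::ₘ (((xs : Multiset Int)) ∩ ((ys : Multiset Int))) := by
      rw [show ((x :: xs : List Int) : Multiset Int) = x ::ₘ (xs : Multiset Int) from rfl]
      rw [Multiset.cons_inter_of_pos _ (by simp)]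
      congr 1
      rw [show ((x :: ys : List Int) : Multiset Int) = x ::ₘ (ys : Multiset Int) from rfl]
      rw [Multiset.erase_cons_head]
    rw [h1, Multiset.card_cons]
    rw [ih (List.Pairwise.of_cons hx) (List.Pairwise.of_cons hy)]
    push_cast; ring
  | case4 x xs y ys hne hlt ih =>
    have hnotmem : x ∉ (y :: ys : List Int) := by
      intro hmem
      rcases List.mem_cons.mp hmem with h | h
      · omega
      · have := (List.pairwise_cons.mp hy).1 x h
        omega
    have h1 : ((x :: xs : List Int) : Multiset Int) ∩ ((y :: ys : List Int) : Multiset Int)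
        = ((xs : Multiset Int)) ∩ ((y :: ys : List Int) : Multiset Int) := by
      rw [show ((x :: xs : List Int) : Multiset Int) = x ::ₘ (xs : Multiset Int) from rfl]
      rw [Multiset.cons_inter_of_neg _ (by simpa using hnotmem)]
    rw [h1, ih (List.Pairwise.of_cons hx) hy]
  | case5 x xs y ys hne hge ih =>
    have hnotmem : y ∉ (x :: xs : List Int) := by
      intro hmem
      rcases List.mem_cons.mp hmem with h | h
      · omega
      · have := (List.pairwise_cons.mp hx).1 y h
        omega
    have h1 : ((x :: xs : List Int) : Multiset Int) ∩ ((y :: ys : List Int) : Multiset Int)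
        = ((x :: xs : List Int) : Multiset Int) ∩ ((ys : Multiset Int)) := by
      rw [Multiset.inter_comm]
      rw [show ((y :: ys : List Int) : Multiset Int) = y ::ₘ (ys : Multiset Int) from rfl]
      rw [Multiset.cons_inter_of_neg _ (by simpa using hnotmem)]
      rw [Multiset.inter_comm]
    rw [h1, ih hx (List.Pairwise.of_cons hy)]

theorem bp_matchesB (A B : List Int) :
    bpMergeCount (PySem.List.sorted A (fun x => x) false)
        (PySem.List.sorted B (fun x => x) false)
      = (bpInterCard A B : Int) := by
  rw [bp_mergeCount_sorted _ _ (PySem.List.sorted_pairwise ..) (PySem.List.sorted_pairwise ..)]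
  have ha : ((PySem.List.sorted A (fun x => x) false : List Int) : Multiset Int) = (A : Multiset Int) :=
    Multiset.coe_eq_coe.mpr (PySem.List.sorted_perm ..)
  have hb : ((PySem.List.sorted B (fun x => x) false : List Int) : Multiset Int) = (B : Multiset Int) :=
    Multiset.coe_eq_coe.mpr (PySem.List.sorted_perm ..)
  rw [bpInterCard, ha, hb]

-- ===== VERDICT (by name: the statement is the Claim_ definition above) =====
theorem beautifulPairs_spec : Claim_equal_beautifulPairs := by
  intro A B _
  unfold Spec_beautifulPairs beautifulPairs beautifulPairs_alt
  simp only [bp_matchesA, bp_matchesB]
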